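-- pv_equiv track=rewrite | github.com/parkersullivan77/RSA-Encryption | RSA/transposition-encr.py | buildMessagegrid
-- ===== SOURCE A (Python) =====
-- def buildMessagegrid(cleanText,rows):
--     messageGrid = []
--     for i in range(rows):
--         row = ['x'] *10
--         messageGrid.append(row)
--         for j in range(0,10):
--             if(i*10) + j > len(cleanText)-1 :
--                 continue
--             else:
--                 messageGrid[i][j] = cleanText[(i*10) + j]
--
--     return messageGrid
-- ===== SOURCE B (Python) =====
-- def buildMessagegrid(cleanText, rows):
--     messageGrid = []
--     for i in range(rows):
--         chunk = cleanText[i*10 : i*10 + 10]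
--         messageGrid.append(list(chunk) + ['x'] * (10 - len(chunk)))
--     return messageGrid
-- ===== Notes on version B (the rewrite author's own statement) =====
-- stated objective: simpler
-- what changed: Replaces the inner j-loop with its per-cell bounds check and in-place grid mutation by a slice of the text plus length-based 'x' padding, building each row in one step.
import Mathlib
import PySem

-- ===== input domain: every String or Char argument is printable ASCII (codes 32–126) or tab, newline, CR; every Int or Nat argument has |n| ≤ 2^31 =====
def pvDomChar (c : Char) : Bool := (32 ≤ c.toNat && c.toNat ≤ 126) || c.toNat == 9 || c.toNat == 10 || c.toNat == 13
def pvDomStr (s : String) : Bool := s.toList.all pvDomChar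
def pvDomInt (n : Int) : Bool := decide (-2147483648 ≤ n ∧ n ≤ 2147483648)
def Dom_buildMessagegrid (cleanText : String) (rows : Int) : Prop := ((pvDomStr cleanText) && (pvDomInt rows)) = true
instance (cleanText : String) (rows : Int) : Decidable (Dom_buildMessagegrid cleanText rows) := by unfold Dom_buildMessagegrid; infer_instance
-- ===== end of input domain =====

-- B replaces A's inner j-loop (per-cell bounds check + in-place grid mutation) by a slice
-- of the text plus length-based 'x' padding, building each row in one step (objective: simpler).

-- ===== PORT A =====
def buildMessagegrid (cleanText : String) (rows : Int) : List (List String) :=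
  let cs := cleanText.toList
  (PySem.List.pyRange 0 rows 1).foldl (fun grid i =>
    let row : List String := List.replicate 10 "x"
    let grid := grid ++ [row]
    (PySem.List.pyRange 0 10 1).foldl (fun grid j =>
      if i * 10 + j > (cs.length : Int) - 1 then grid
      else
        -- messageGrid[i][j] = cleanText[(i*10)+j]: here i indexes the just-appended row and
        -- (i*10)+j is in range (the branch guard), so set/getD with in-range indices is exact
        grid.set i.toNat ((grid.getD i.toNat []).set j.toNat
          (String.ofList [cs.getD (i * 10 + j).toNat 'x']))) grid) []

-- ===== PORT B =====
def buildMessagegrid_alt (cleanText : String) (rows : Int) : List (List String) :=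
  let cs := cleanText.toList
  (PySem.List.pyRange 0 rows 1).foldl (fun grid i =>
    let chunk := PySem.List.slice cs (some (i * 10)) (some (i * 10 + 10))
    grid ++ [chunk.map (fun c => String.ofList [c]) ++ List.replicate (10 - chunk.length) "x"]) []

-- ===== PRECONDITION & SPEC =====
def Spec_buildMessagegrid (cleanText : String) (rows : Int) (out : List (List String)) : Prop := out = buildMessagegrid_alt cleanText rows
instance (cleanText : String) (rows : Int) (out : List (List String)) : Decidable (Spec_buildMessagegrid cleanText rows out) := by unfold Spec_buildMessagegrid; infer_instance

-- ===== CLAIM (what is proved, stated in full; the proofs are below) =====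
def Claim_equal_buildMessagegrid : Prop := ∀ (cleanText : String) (rows : Int), Dom_buildMessagegrid cleanText rows → Spec_buildMessagegrid cleanText rows (buildMessagegrid cleanText rows)

-- ===== LEMMAS AND PROOFS =====

-- B's row for index i
def rowB (cs : List Char) (i : Int) : List String :=
  let chunk := PySem.List.slice cs (some (i * 10)) (some (i * 10 + 10))
  chunk.map (fun c => String.ofList [c]) ++ List.replicate (10 - chunk.length) "x"

-- A's inner loop only ever touches the last row of the grid: lift it to a fold on that row
theorem liftFold (cond : Int → Prop) [DecidablePred cond] (c : Int → String)
    (g : List (List String)) (js : List Int) (r : List String) :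
    List.foldl (fun grid j => if cond j then grid
        else grid.set g.length ((grid.getD g.length []).set j.toNat (c j))) (g ++ [r]) js
    = g ++ [List.foldl (fun row j => if cond j then row else row.set j.toNat (c j)) r js] := by
  induction js generalizing r with
  | nil => rfl
  | cons j js ih =>
    simp only [List.foldl_cons]
    by_cases h : cond j
    · simp only [if_pos h, ih]
    · rw [if_neg h, if_neg h,
        show (g ++ [r]).getD g.length [] = r by simp [List.getD],
        show (g ++ [r]).set g.length (r.set j.toNat (c j)) = g ++ [r.set j.toNat (c j)] by simp,
        ih]

-- the row A's inner loop builds equals B's slice-plus-padding row (d = text dropped to row start)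
theorem rowFold (d : List Char) :
    (List.foldl (fun (r : List String) (j : Int) =>
        if (d.length : Int) ≤ j then r else r.set j.toNat (String.ofList [d.getD j.toNat 'x']))
      (List.replicate 10 "x") [0,1,2,3,4,5,6,7,8,9])
    = (d.take 10).map (fun c => String.ofList [c]) ++ List.replicate (10 - (d.take 10).length) "x" := by
  rcases d with _|⟨a0,d⟩; · simp
  rcases d with _|⟨a1,d⟩; · simp
  rcases d with _|⟨a2,d⟩; · simp
  rcases d with _|⟨a3,d⟩; · simp
  rcases d with _|⟨a4,d⟩; · simp
  rcases d with _|⟨a5,d⟩; · simp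
  rcases d with _|⟨a6,d⟩; · simp
  rcases d with _|⟨a7,d⟩; · simp
  rcases d with _|⟨a8,d⟩; · simp
  rcases d with _|⟨a9,d⟩; · simp
  rw [show (List.foldl (fun (r : List String) (j : Int) =>
      if ((a0::a1::a2::a3::a4::a5::a6::a7::a8::a9::d).length : Int) ≤ j then r
      else r.set j.toNat (String.ofList [(a0::a1::a2::a3::a4::a5::a6::a7::a8::a9::d).getD j.toNat 'x']))
    (List.replicate 10 "x") [0,1,2,3,4,5,6,7,8,9])
    = (List.foldl (fun (r : List String) (j : Int) =>
      r.set j.toNat (String.ofList [(a0::a1::a2::a3::a4::a5::a6::a7::a8::a9::d).getD j.toNat 'x']))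
    (List.replicate 10 "x") [0,1,2,3,4,5,6,7,8,9]) from
    PySem.List.foldl_congr_mem _ _ _ _ (by intro acc j hj; fin_cases hj <;> rw [if_neg (by simp; omega)])]
  simp

-- one outer iteration of A, on a grid of length i, appends exactly B's row
theorem stepA (cs : List Char) (g : List (List String)) (i : Int) (hi : 0 ≤ i)
    (hlen : g.length = i.toNat) :
    (PySem.List.pyRange 0 10 1).foldl (fun grid j =>
      if i * 10 + j > (cs.length : Int) - 1 then grid
      else grid.set i.toNat ((grid.getD i.toNat []).set j.toNat
        (String.ofList [cs.getD (i * 10 + j).toNat 'x']))) (g ++ [List.replicate 10 "x"])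
    = g ++ [rowB cs i] := by
  have hm : ((i * 10).toNat : Int) = i * 10 := Int.toNat_of_nonneg (by omega)
  have hrange : PySem.List.pyRange 0 10 1 = [0,1,2,3,4,5,6,7,8,9] := by decide
  rw [hrange, ← hlen, liftFold (fun j => i * 10 + j > (cs.length : Int) - 1)]
  congr 1
  set d : List Char := cs.drop (i * 10).toNat with hd
  have hdl : d.length = cs.length - (i * 10).toNat := by simp [hd]
  rw [show (List.foldl (fun (row : List String) (j : Int) =>
      if i * 10 + j > (cs.length : Int) - 1 then row
      else row.set j.toNat (String.ofList [cs.getD (i * 10 + j).toNat 'x']))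
      (List.replicate 10 "x") [0,1,2,3,4,5,6,7,8,9])
    = (List.foldl (fun (row : List String) (j : Int) =>
      if (d.length : Int) ≤ j then row else row.set j.toNat (String.ofList [d.getD j.toNat 'x']))
      (List.replicate 10 "x") [0,1,2,3,4,5,6,7,8,9]) from
    PySem.List.foldl_congr_mem _ _ _ _ (by
      intro acc j hj
      have hj09 : 0 ≤ j ∧ j ≤ 9 := by fin_cases hj <;> omega
      have hcond : (i * 10 + j > (cs.length : Int) - 1) ↔ ((d.length : Int) ≤ j) := by
        rw [hdl]; omega
      have hidx : (i * 10 + j).toNat = (i * 10).toNat + j.toNat := by omega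
      have hget : cs.getD (i * 10 + j).toNat 'x' = d.getD j.toNat 'x' := by
        rw [hd, hidx]; simp [List.getD, List.getElem?_drop]
      by_cases h : (d.length : Int) ≤ j
      · rw [if_pos (hcond.mpr h), if_pos h]
      · rw [if_neg (fun hc => h (hcond.mp hc)), if_neg h, hget])]
  rw [rowFold]
  have hsl : PySem.List.slice cs (some (i * 10)) (some (i * 10 + 10)) = d.take 10 := by
    rw [PySem.List.slice_toNat cs (by omega) (by omega), hd]
    congr 1
    omega
  simp only [rowB, hsl]

-- A's whole fold produces the map of B's rows
theorem foldA (cs : List Char) (n : Nat) :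
    ((List.range n).map (fun k : Nat => (k : Int))).foldl (fun grid i =>
      (PySem.List.pyRange 0 10 1).foldl (fun grid j =>
        if i * 10 + j > (cs.length : Int) - 1 then grid
        else grid.set i.toNat ((grid.getD i.toNat []).set j.toNat
          (String.ofList [cs.getD (i * 10 + j).toNat 'x']))) (grid ++ [List.replicate 10 "x"])) []
    = ((List.range n).map (fun k : Nat => (k : Int))).map (rowB cs) := by
  induction n with
  | zero => rfl
  | succ n ih =>
    rw [List.range_succ, List.map_append, List.foldl_append, ih]
    simp only [List.map_cons, List.map_nil, List.foldl_cons, List.foldl_nil]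
    rw [stepA cs _ (n : Int) (by omega) (by simp)]
    simp

-- the two ports, with their local 'let's reduced (definitional)
theorem aEq (cleanText : String) (rows : Int) :
    buildMessagegrid cleanText rows
    = (PySem.List.pyRange 0 rows 1).foldl (fun grid i =>
        (PySem.List.pyRange 0 10 1).foldl (fun grid j =>
          if i * 10 + j > (cleanText.toList.length : Int) - 1 then grid
          else grid.set i.toNat ((grid.getD i.toNat []).set j.toNat
            (String.ofList [cleanText.toList.getD (i * 10 + j).toNat 'x'])))
          (grid ++ [List.replicate 10 "x"])) [] := rfl

theorem altEq (cleanText : String) (rows : Int) :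
    buildMessagegrid_alt cleanText rows
    = (PySem.List.pyRange 0 rows 1).foldl (fun grid i => grid ++ [rowB cleanText.toList i]) [] := rfl

-- ===== VERDICT (by name: the statement is the Claim_ definition above) =====
theorem buildMessagegrid_spec : Claim_equal_buildMessagegrid := by
  intro cleanText rows _
  unfold Spec_buildMessagegrid
  rw [aEq, altEq,
    show PySem.List.pyRange 0 rows 1 = (List.range rows.toNat).map (fun k : Nat => (k : Int)) from by
      rw [PySem.List.pyRange_one]; simp only [Int.sub_zero, zero_add],
    foldA, PySem.List.foldl_append_singleton_eq_map]
  simp
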